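-- pv_equiv track=rewrite | github.com/syren-pratik/alteryx-pyspark-converter | alteryx_pyspark_converter/src/utils/code_formatter.py | optimize_imports
-- ===== SOURCE A (Python) =====
-- def optimize_imports(code: str) -> str:
--     """Optimize and organize imports in the generated code."""
--     lines = code.split('\n')
--
--     # Extract imports
--     imports = []
--     other_lines = []
--
--     for line in lines:
--         if line.strip().startswith(('from ', 'import ')):
--             imports.append(line)
--         else:
--             other_lines.append(line)
--
--     # Remove duplicates while preserving order
--     seen = set()
--     unique_imports = []
--     for imp in imports:
--         if imp not in seen:
--             unique_imports.append(imp)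
--             seen.add(imp)
--
--     # Sort imports
--     pyspark_imports = [imp for imp in unique_imports if 'pyspark' in imp]
--     other_imports = [imp for imp in unique_imports if 'pyspark' not in imp]
--
--     # Combine back
--     organized_imports = sorted(other_imports) + sorted(pyspark_imports)
--
--     if organized_imports:
--         return '\n'.join(organized_imports) + '\n\n' + '\n'.join(other_lines)
--     else:
--         return '\n'.join(other_lines)
-- ===== SOURCE B (Python) =====
-- def _insert_unique(xs, x):
--     """Insert x into the sorted list xs in place, unless already present."""
--     i = 0
--     while i < len(xs) and xs[i] < x:
--         i += 1
--     if i == len(xs) or xs[i] != x: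
--         xs.insert(i, x)
--
--
-- def optimize_imports(code: str) -> str:
--     """Optimize and organize imports in the generated code."""
--     nonspark = []   # sorted unique non-pyspark imports, maintained online
--     spark = []      # sorted unique pyspark imports, maintained online
--     other = []
--     for line in code.split('\n'):
--         stripped = line.strip()
--         if stripped.startswith('from ') or stripped.startswith('import '):
--             _insert_unique(spark if 'pyspark' in line else nonspark, line)
--         else:
--             other.append(line)
--     organized = nonspark + spark
--     if organized:
--         return '\n'.join(organized) + '\n\n' + '\n'.join(other)
--     return '\n'.join(other)
-- ===== Notes on version B (the rewrite author's own statement) =====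
-- stated objective: alternative
-- what changed: B maintains two sorted duplicate-free lists (non-pyspark / pyspark imports) by online ordered insertion with dedup-by-position during the single scan, replacing A's staged pipeline of route loop, seen-set dedup loop, two filter passes and two sorted() calls; there is no set and no sort call in B.
import Mathlib
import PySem

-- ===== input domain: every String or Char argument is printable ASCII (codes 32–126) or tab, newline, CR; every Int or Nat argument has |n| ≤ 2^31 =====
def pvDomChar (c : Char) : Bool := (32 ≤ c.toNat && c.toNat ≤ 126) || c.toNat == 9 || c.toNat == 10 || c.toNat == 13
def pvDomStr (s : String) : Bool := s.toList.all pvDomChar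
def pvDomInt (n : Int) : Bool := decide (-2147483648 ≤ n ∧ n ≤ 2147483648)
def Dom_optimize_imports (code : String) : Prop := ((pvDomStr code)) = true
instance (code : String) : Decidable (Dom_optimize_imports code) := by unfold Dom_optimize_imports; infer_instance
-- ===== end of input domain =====

-- B replaces A's staged pipeline (route, seen-set dedup, two filters, two sorts) by one scan
-- that maintains two sorted duplicate-free lists via ordered insertion (alternative decomposition).

-- ===== PORT A =====
-- line.strip().startswith(('from ', 'import '))
def pvIsImport (line : String) : Bool :=
  PySem.Str.startswith (PySem.Str.strip line) "from " ||
  PySem.Str.startswith (PySem.Str.strip line) "import "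

def optimize_imports (code : String) : String :=
  -- code.split('\n'); the separator is the non-empty literal '\n', so split? is always some
  let lines := (PySem.Str.split? code "\n").getD []
  -- routing loop
  let routed := lines.foldl
    (fun (st : List String × List String) line =>
      if pvIsImport line then (st.1 ++ [line], st.2) else (st.1, st.2 ++ [line]))
    ([], [])
  let imports := routed.1
  let other_lines := routed.2
  -- dedup loop with a seen set
  let ded := imports.foldl
    (fun (st : List String × PySem.Set String) imp =>
      if imp ∈ st.2 then st else (st.1 ++ [imp], st.2.add imp))
    ([], PySem.Set.ofList [])
  let unique_imports := ded.1
  let pyspark_imports := unique_imports.filter (fun imp => PySem.Str.isIn "pyspark" imp)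
  let other_imports := unique_imports.filter (fun imp => !(PySem.Str.isIn "pyspark" imp))
  let organized_imports :=
    PySem.List.sorted other_imports (fun x => x) false ++
    PySem.List.sorted pyspark_imports (fun x => x) false
  if organized_imports = [] then PySem.Str.join "\n" other_lines
  else PySem.Str.join "\n" organized_imports ++ "\n\n" ++ PySem.Str.join "\n" other_lines

-- ===== PORT B =====
-- _insert_unique: the index-scan 'while xs[i] < x' + positional insert/skip, as the obvious
-- structural recursion over the same list
def pvInsertUnique (xs : List String) (x : String) : List String :=
  match xs with
  | [] => [x]
  | a :: t => if a < x then a :: pvInsertUnique t x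
              else if a ≠ x then x :: a :: t
              else a :: t

def optimize_imports_alt (code : String) : String :=
  -- one scan with state (nonspark, spark, other)
  let st := ((PySem.Str.split? code "\n").getD []).foldl
    (fun (st : List String × List String × List String) line =>
      if PySem.Str.startswith (PySem.Str.strip line) "from " ||
         PySem.Str.startswith (PySem.Str.strip line) "import " then
        if PySem.Str.isIn "pyspark" line then (st.1, pvInsertUnique st.2.1 line, st.2.2)
        else (pvInsertUnique st.1 line, st.2.1, st.2.2)
      else (st.1, st.2.1, st.2.2 ++ [line]))
    ([], [], [])
  let organized := st.1 ++ st.2.1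
  if organized = [] then PySem.Str.join "\n" st.2.2
  else PySem.Str.join "\n" organized ++ "\n\n" ++ PySem.Str.join "\n" st.2.2

-- ===== PRECONDITION & SPEC =====
def Spec_optimize_imports (code : String) (out : String) : Prop := out = optimize_imports_alt code
instance (code : String) (out : String) : Decidable (Spec_optimize_imports code out) := by unfold Spec_optimize_imports; infer_instance

-- ===== CLAIM =====
def Claim_equal_optimize_imports : Prop := ∀ (code : String), Dom_optimize_imports code → Spec_optimize_imports code (optimize_imports code)

-- ===== LEMMAS AND PROOFS =====

theorem pvInsertUnique_mem (xs : List String) (x y : String) :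
    y ∈ pvInsertUnique xs x ↔ y = x ∨ y ∈ xs := by
  induction xs with
  | nil => simp [pvInsertUnique]
  | cons a t ih =>
    simp only [pvInsertUnique]
    split_ifs with h1 h2
    · simp [ih, or_left_comm]
    · simp
    · simp only [ne_eq, not_not] at h2
      subst h2
      simp

theorem pvInsertUnique_pairwise (xs : List String) (x : String)
    (h : xs.Pairwise (· < ·)) : (pvInsertUnique xs x).Pairwise (· < ·) := by
  induction xs with
  | nil => simp [pvInsertUnique]
  | cons a t ih =>
    rw [List.pairwise_cons] at h
    simp only [pvInsertUnique]
    split_ifs with h1 h2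
    · rw [List.pairwise_cons]
      refine ⟨fun y hy => ?_, ih h.2⟩
      rcases (pvInsertUnique_mem t x y).mp hy with rfl | hy
      · exact h1
      · exact h.1 y hy
    · have hxa : x < a := lt_of_le_of_ne (not_lt.mp h1) (Ne.symm h2)
      rw [List.pairwise_cons]
      exact ⟨fun y hy => by
        rcases List.mem_cons.mp hy with rfl | hy
        · exact hxa
        · exact hxa.trans (h.1 y hy), List.pairwise_cons.mpr h⟩
    · exact List.pairwise_cons.mpr h

-- the insertion fold over l: strictly sorted accumulator stays strictly sorted, members = acc ∪ l
theorem pvInsFold_pairwise (l : List String) (acc : List String)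
    (h : acc.Pairwise (· < ·)) : (l.foldl pvInsertUnique acc).Pairwise (· < ·) := by
  induction l generalizing acc with
  | nil => exact h
  | cons a t ih => exact ih _ (pvInsertUnique_pairwise acc a h)

theorem pvInsFold_mem (l : List String) (acc : List String) (y : String) :
    y ∈ l.foldl pvInsertUnique acc ↔ y ∈ acc ∨ y ∈ l := by
  induction l generalizing acc with
  | nil => simp
  | cons a t ih =>
    rw [List.foldl_cons, ih, pvInsertUnique_mem]
    simp; tauto

-- A's routing loop
theorem pvRouteA (lines : List String) (I O : List String) :
    lines.foldl
      (fun (st : List String × List String) line =>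
        if pvIsImport line then (st.1 ++ [line], st.2) else (st.1, st.2 ++ [line]))
      (I, O) =
    (I ++ lines.filter pvIsImport, O ++ lines.filter (fun l => !pvIsImport l)) := by
  induction lines generalizing I O with
  | nil => simp
  | cons x l ih =>
    by_cases hx : pvIsImport x = true
    · simp [hx, ih]
    · simp only [Bool.not_eq_true] at hx
      simp [hx, ih]

-- A's dedup loop: invariant — the list is nodup, the set has exactly the list's members
theorem pvDedupA (l : List String) (u : List String) (S : PySem.Set String)
    (hn : u.Nodup) (hs : ∀ x, x ∈ S ↔ x ∈ u) :
    (l.foldl (fun (st : List String × PySem.Set String) imp =>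
        if imp ∈ st.2 then st else (st.1 ++ [imp], st.2.add imp)) (u, S)).1.Nodup ∧
    (∀ y, y ∈ (l.foldl (fun (st : List String × PySem.Set String) imp =>
        if imp ∈ st.2 then st else (st.1 ++ [imp], st.2.add imp)) (u, S)).1 ↔ y ∈ u ∨ y ∈ l) := by
  induction l generalizing u S with
  | nil => exact ⟨hn, fun y => by simp⟩
  | cons a t ih =>
    rw [List.foldl_cons]
    by_cases ha : a ∈ S
    · simp only [ha, if_true]
      obtain ⟨h1, h2⟩ := ih u S hn hs
      refine ⟨h1, fun y => ?_⟩
      rw [h2]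
      have hau := (hs a).mp ha
      constructor
      · rintro (h | h)
        · exact Or.inl h
        · exact Or.inr (List.mem_cons_of_mem a h)
      · rintro (h | h)
        · exact Or.inl h
        · rcases List.mem_cons.mp h with rfl | h
          · exact Or.inl hau
          · exact Or.inr h
    · simp only [ha, if_false]
      obtain ⟨h1, h2⟩ := ih (u ++ [a]) (S.add a)
        ((List.perm_append_singleton a u).nodup_iff.mpr
          (List.nodup_cons.mpr ⟨fun h => ha ((hs a).mpr h), hn⟩))
        (fun x => by rw [PySem.Set.mem_add]; simp [hs x, or_comm])
      refine ⟨h1, fun y => ?_⟩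
      rw [h2]
      simp [or_assoc]

-- B's fused scan = per-category insertion folds + the other-lines filter
theorem pvScanB (lines : List String) (N P O : List String) :
    lines.foldl
      (fun (st : List String × List String × List String) line =>
        if PySem.Str.startswith (PySem.Str.strip line) "from " ||
           PySem.Str.startswith (PySem.Str.strip line) "import " then
          if PySem.Str.isIn "pyspark" line then (st.1, pvInsertUnique st.2.1 line, st.2.2)
          else (pvInsertUnique st.1 line, st.2.1, st.2.2)
        else (st.1, st.2.1, st.2.2 ++ [line]))
      (N, P, O) =
    ( (lines.filter (fun l => pvIsImport l && !PySem.Str.isIn "pyspark" l)).foldl pvInsertUnique N,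
      (lines.filter (fun l => pvIsImport l && PySem.Str.isIn "pyspark" l)).foldl pvInsertUnique P,
      O ++ lines.filter (fun l => !pvIsImport l) ) := by
  induction lines generalizing N P O with
  | nil => simp
  | cons x l ih =>
    have hcond : (PySem.Str.startswith (PySem.Str.strip x) "from " ||
        PySem.Str.startswith (PySem.Str.strip x) "import ") = pvIsImport x := rfl
    rw [List.foldl_cons]
    rw [hcond]
    by_cases hx : pvIsImport x = true
    · by_cases hp : PySem.Str.isIn "pyspark" x = true
      · rw [if_pos hx, if_pos hp, ih]
        simp [PySem.Str.isIn] at hp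
        simp [hx, hp]
      · rw [if_pos hx, if_neg hp, ih]
        simp only [Bool.not_eq_true] at hp
        simp [PySem.Str.isIn] at hp
        simp [hx, hp]
    · rw [if_neg hx, ih]
      simp only [Bool.not_eq_true] at hx
      simp [hx]

-- sorted of a filtered dedup list equals the corresponding insertion fold
theorem pvSortedEqFold (p : String → Bool) (u l : List String)
    (hn : u.Nodup) (hmem : ∀ y, y ∈ u ↔ y ∈ l) :
    PySem.List.sorted (u.filter p) (fun x => x) false = (l.filter p).foldl pvInsertUnique [] := by
  apply PySem.List.sorted_eq_of_perm_of_pairwise_lt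
  · -- perm: both nodup with the same members
    apply (List.perm_ext_iff_of_nodup ?_ (hn.filter p)).mpr
    · intro y
      rw [pvInsFold_mem]
      simp [List.mem_filter, hmem y]
    · exact (pvInsFold_pairwise _ [] (by simp)).nodup
  · exact pvInsFold_pairwise _ [] (by simp)

-- ===== VERDICT =====
theorem optimize_imports_spec : Claim_equal_optimize_imports := by
  intro code _
  show optimize_imports code = optimize_imports_alt code
  unfold optimize_imports optimize_imports_alt
  dsimp only
  rw [pvScanB _ [] [] [], pvRouteA _ [] []]
  simp only [List.nil_append]
  set lines := (PySem.Str.split? code "\n").getD [] with hl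
  obtain ⟨hnod, hmem⟩ := pvDedupA (lines.filter pvIsImport) [] (PySem.Set.ofList [])
    (by simp) (by simp [PySem.Set.ofList])
  set u := ((lines.filter pvIsImport).foldl
    (fun (st : List String × PySem.Set String) imp =>
      if imp ∈ st.2 then st else (st.1 ++ [imp], st.2.add imp)) ([], PySem.Set.ofList [])).1
  have hmem' : ∀ y, y ∈ u ↔ y ∈ lines.filter pvIsImport := by
    intro y; rw [hmem y]; simp
  have h1 := pvSortedEqFold (fun imp => !(PySem.Str.isIn "pyspark" imp)) u
    (lines.filter pvIsImport) hnod hmem'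
  have h2 := pvSortedEqFold (fun imp => PySem.Str.isIn "pyspark" imp) u
    (lines.filter pvIsImport) hnod hmem'
  rw [List.filter_filter] at h1 h2
  rw [List.filter_congr (fun a _ => Bool.and_comm _ _)] at h1
  rw [List.filter_congr (fun a _ => Bool.and_comm _ _)] at h2
  rw [← h1, ← h2]
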